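-- pv_equiv track=rewrite | github.com/python-poetry/poetry | venv/Lib/site-packages/dulwich/sparse_patterns.py | parse_sparse_patterns
-- ===== SOURCE A (Python) =====
-- def parse_sparse_patterns(lines):
--     """Parse pattern lines from a sparse-checkout file (.git/info/sparse-checkout).
--
--     This simplified parser:
--       1. Strips comments (#...) and empty lines.
--       2. Returns a list of (pattern, is_negation, is_dir_only, anchored) tuples.
--
--     These lines are similar to .gitignore patterns but are used for sparse-checkout
--     logic. This function strips comments and blank lines, identifies negation,
--     anchoring, and directory-only markers, and returns data suitable for matching.
--
--     Example:
--       ``line = "/*.txt" -> ("/.txt", False, False, True)``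
--       ``line = "!/docs/" -> ("/docs/", True, True, True)``
--       ``line = "mydir/" -> ("mydir/", False, True, False)`` not anchored, no leading "/"
--
--     Args:
--       lines: A list of raw lines (strings) from the sparse-checkout file.
--
--     Returns:
--       A list of tuples (pattern, negation, dir_only, anchored), representing
--       the essential details needed to perform matching.
--     """
--     results = []
--     for raw_line in lines:
--         line = raw_line.strip()
--         if not line or line.startswith("#"):
--             continue  # ignore comments and blank lines
--
--         negation = line.startswith("!")
--         if negation:
--             line = line[1:]  # remove leading '!'
--
--         anchored = line.startswith("/")
--         if anchored:
--             line = line[1:]  # remove leading '/'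
--
--         # If pattern ends with '/', we consider it directory-only
--         # (like "docs/"). Real Git might treat it slightly differently,
--         # but we'll simplify and mark it as "dir_only" if it ends in "/".
--         dir_only = False
--         if line.endswith("/"):
--             dir_only = True
--             line = line[:-1]
--
--         results.append((line, negation, dir_only, anchored))
--     return results
-- ===== SOURCE B (Python) =====
-- import re
--
-- _PATTERN = re.compile(r'(!)?(/)?(.*?)(/)?\Z', re.DOTALL)
--
--
-- def parse_sparse_patterns(lines):
--     results = []
--     for raw_line in lines:
--         line = raw_line.strip()
--         if line and not line.startswith("#"):
--             m = _PATTERN.match(line)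
--             results.append(
--                 (m.group(3), m.group(1) is not None,
--                  m.group(4) is not None, m.group(2) is not None)
--             )
--     return results
-- ===== Notes on version B (the rewrite author's own statement) =====
-- stated objective: idiomatic
-- what changed: The sequential negation/anchor/dir-only slice-stripping is replaced by a single declarative regex match per line: (!)?(/)?(.*?)(/)? with non-greedy middle, and the tuple is built directly from the four groups.
import Mathlib
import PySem

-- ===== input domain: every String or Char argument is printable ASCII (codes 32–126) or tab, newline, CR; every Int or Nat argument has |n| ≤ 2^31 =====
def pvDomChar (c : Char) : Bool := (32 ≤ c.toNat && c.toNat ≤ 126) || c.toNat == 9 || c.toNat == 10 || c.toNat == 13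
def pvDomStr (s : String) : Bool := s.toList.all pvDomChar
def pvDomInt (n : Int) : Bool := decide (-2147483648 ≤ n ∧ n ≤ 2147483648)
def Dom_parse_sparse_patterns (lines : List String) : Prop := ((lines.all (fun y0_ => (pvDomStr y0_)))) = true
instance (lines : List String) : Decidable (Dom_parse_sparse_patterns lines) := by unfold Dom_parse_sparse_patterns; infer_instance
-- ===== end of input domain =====

-- B replaces A's sequential negation/anchor/dir-only slice-stripping by one declarative
-- regex match (!)?(/)?(.*?)(/)? per line (objective: idiomatic); same cost.

-- ===== PORT A =====
def parse_sparse_patterns (lines : List String) : List (String × Bool × Bool × Bool) :=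
  lines.foldl (fun results raw_line =>
    let line := PySem.Str.strip raw_line
    if line = "" || PySem.Str.startswith line "#" then results
    else
      let negation := PySem.Str.startswith line "!"
      let line := if negation then PySem.Str.slice line (some 1) none else line
      let anchored := PySem.Str.startswith line "/"
      let line := if anchored then PySem.Str.slice line (some 1) none else line
      let dir_only := PySem.Str.endswith line "/"
      let line := if dir_only then PySem.Str.slice line none (some (-1)) else line
      results ++ [(line, negation, dir_only, anchored)]) []

-- ===== PORT B =====
-- Deterministic transcription of re.match(r'(!)?(/)?(.*?)(/)?\Z', line, re.DOTALL) on a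
-- stripped line: the optional groups 1 and 2 each take one leading char if present; the
-- non-greedy (.*?) followed by (/)?\Z gives group 4 the final '/' exactly when one exists.
def pvRegexMatch (cs : List Char) : String × Bool × Bool × Bool :=
  let (g1, cs1) := if cs.head? = some '!' then (true, cs.tail) else (false, cs)
  let (g2, cs2) := if cs1.head? = some '/' then (true, cs1.tail) else (false, cs1)
  let (g3, g4) := if cs2.getLast? = some '/' then (cs2.dropLast, true) else (cs2, false)
  (String.ofList g3, g1, g4, g2)

def parse_sparse_patterns_alt (lines : List String) : List (String × Bool × Bool × Bool) :=
  lines.filterMap (fun raw_line =>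
    let line := PySem.Str.strip raw_line
    if line ≠ "" ∧ ¬ PySem.Str.startswith line "#" then some (pvRegexMatch line.toList)
    else none)

-- ===== PRECONDITION & SPEC =====
def Spec_parse_sparse_patterns (lines : List String) (out : List (String × Bool × Bool × Bool)) : Prop := out = parse_sparse_patterns_alt lines
instance (lines : List String) (out : List (String × Bool × Bool × Bool)) : Decidable (Spec_parse_sparse_patterns lines out) := by unfold Spec_parse_sparse_patterns; infer_instance

-- ===== CLAIM (what is proved, stated in full; the proofs are below) =====
def Claim_equal_parse_sparse_patterns : Prop := ∀ (lines : List String), Dom_parse_sparse_patterns lines → Spec_parse_sparse_patterns lines (parse_sparse_patterns lines)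

-- ===== LEMMAS AND PROOFS =====

-- The value A's loop body appends for a non-skipped stripped line.
def pvABody (line : String) : String × Bool × Bool × Bool :=
  let negation := PySem.Str.startswith line "!"
  let line := if negation then PySem.Str.slice line (some 1) none else line
  let anchored := PySem.Str.startswith line "/"
  let line := if anchored then PySem.Str.slice line (some 1) none else line
  let dir_only := PySem.Str.endswith line "/"
  let line := if dir_only then PySem.Str.slice line none (some (-1)) else line
  (line, negation, dir_only, anchored)

lemma prefix_singleton_iff {α : Type} (a : α) (l : List α) : [a] <+: l ↔ l.head? = some a := by
  cases l with
  | nil => simp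
  | cons b t => simp [List.cons_prefix_cons, eq_comm]

lemma suffix_singleton_iff {α : Type} (a : α) (l : List α) : [a] <:+ l ↔ l.getLast? = some a := by
  constructor
  · rintro ⟨t, rfl⟩; simp
  · intro h
    cases l with
    | nil => simp at h
    | cons b t =>
      refine ⟨(b :: t).dropLast, ?_⟩
      have := (b :: t).dropLast_append_getLast? (a := a)
      simp_all

lemma sw_bang (s : String) : PySem.Str.startswith s "!" = decide (s.toList.head? = some '!') := by
  rw [Bool.eq_iff_iff]
  simp [PySem.Chars.startswith_iff, show ("!" : String).toList = ['!'] by decide, prefix_singleton_iff]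

lemma sw_slash (s : String) : PySem.Str.startswith s "/" = decide (s.toList.head? = some '/') := by
  rw [Bool.eq_iff_iff]
  simp [PySem.Chars.startswith_iff, show ("/" : String).toList = ['/'] by decide, prefix_singleton_iff]

lemma ew_slash (s : String) : PySem.Str.endswith s "/" = decide (s.toList.getLast? = some '/') := by
  rw [Bool.eq_iff_iff]
  simp [PySem.Chars.endswith_iff, show ("/" : String).toList = ['/'] by decide, suffix_singleton_iff]

lemma toList_eq_iff (s : String) (l : List Char) : s = String.ofList l ↔ s.toList = l := by
  constructor
  · rintro rfl; simp
  · intro h; have := congrArg String.ofList h; simpa using this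

theorem pvABody_eq_regex (line : String) : pvABody line = pvRegexMatch line.toList := by
  unfold pvABody pvRegexMatch
  simp only [sw_bang, sw_slash, ew_slash, decide_eq_true_eq]
  split_ifs <;> simp_all [toList_eq_iff, PySem.List.slice_from_one, PySem.List.slice_to_neg_one]

theorem foldl_eq_filterMap (lines : List String)
    (acc : List (String × Bool × Bool × Bool)) :
    lines.foldl (fun results raw_line =>
      let line := PySem.Str.strip raw_line
      if line = "" || PySem.Str.startswith line "#" then results
      else results ++ [pvABody line]) acc
    = acc ++ lines.filterMap (fun raw_line =>
        let line := PySem.Str.strip raw_line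
        if line ≠ "" ∧ ¬ PySem.Str.startswith line "#" then some (pvRegexMatch line.toList)
        else none) := by
  induction lines generalizing acc with
  | nil => simp
  | cons h t ih =>
    by_cases hc : (decide (PySem.Str.strip h = "") || PySem.Str.startswith (PySem.Str.strip h) "#") = true
    · have hf : (fun raw_line =>
          let line := PySem.Str.strip raw_line
          if line ≠ "" ∧ ¬ PySem.Str.startswith line "#" then some (pvRegexMatch line.toList)
          else none) h = none := by
        simp only [Bool.or_eq_true, decide_eq_true_eq] at hc
        exact if_neg (by tauto)
      rw [List.foldl_cons, if_pos hc]
      simp only [List.filterMap_cons, hf]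
      exact ih acc
    · have hc' : PySem.Str.strip h ≠ "" ∧ ¬ PySem.Str.startswith (PySem.Str.strip h) "#" = true := by
        simp only [Bool.or_eq_true, decide_eq_true_eq] at hc
        tauto
      have hf : (fun raw_line =>
          let line := PySem.Str.strip raw_line
          if line ≠ "" ∧ ¬ PySem.Str.startswith line "#" then some (pvRegexMatch line.toList)
          else none) h = some (pvRegexMatch (PySem.Str.strip h).toList) := by
        exact if_pos hc'
      rw [List.foldl_cons, if_neg hc]
      simp only [List.filterMap_cons, hf]
      rw [ih, pvABody_eq_regex, List.append_assoc, List.singleton_append]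

-- ===== VERDICT =====
theorem parse_sparse_patterns_spec : Claim_equal_parse_sparse_patterns := by
  intro lines _
  unfold Spec_parse_sparse_patterns parse_sparse_patterns parse_sparse_patterns_alt
  rw [show (fun (results : List (String × Bool × Bool × Bool)) raw_line =>
      let line := PySem.Str.strip raw_line
      if line = "" || PySem.Str.startswith line "#" then results
      else
        let negation := PySem.Str.startswith line "!"
        let line := if negation then PySem.Str.slice line (some 1) none else line
        let anchored := PySem.Str.startswith line "/"
        let line := if anchored then PySem.Str.slice line (some 1) none else line
        let dir_only := PySem.Str.endswith line "/"
        let line := if dir_only then PySem.Str.slice line none (some (-1)) else line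
        results ++ [(line, negation, dir_only, anchored)])
    = (fun results raw_line =>
      let line := PySem.Str.strip raw_line
      if line = "" || PySem.Str.startswith line "#" then results
      else results ++ [pvABody line]) from rfl]
  rw [foldl_eq_filterMap, List.nil_append]
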